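-- pv_equiv track=rewrite | github.com/romabukreev-cmd/Autopasting-Syntx | modules/scheduler.py | _distribute_pins
-- ===== SOURCE A (Python) =====
-- def _distribute_pins(total: int, days: int, min_per_day: int, max_per_day: int) -> list[int]:
--     base = total // days
--     base = max(min_per_day, min(max_per_day, base))
--     result = [base] * days
--     remainder = total - sum(result)
--     for i in range(abs(remainder)):
--         if remainder > 0 and result[i % days] < max_per_day:
--             result[i % days] += 1
--         elif remainder < 0 and result[i % days] > min_per_day:
--             result[i % days] -= 1
--     return result
-- ===== SOURCE B (Python) =====
-- def _distribute_pins(total: int, days: int, min_per_day: int, max_per_day: int) -> list[int]: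
--     base = max(min_per_day, min(max_per_day, total // days))
--     delta = total - base * days
--     if delta >= 0:
--         cap = max(0, max_per_day - base)
--         q, s = divmod(delta, days)
--         return [base + min(cap, q + (1 if j < s else 0)) for j in range(days)]
--     cap = max(0, base - min_per_day)
--     q, s = divmod(-delta, days)
--     return [base - min(cap, q + (1 if j < s else 0)) for j in range(days)]
-- ===== Notes on version B (the rewrite author's own statement) =====
-- stated objective: faster
-- what changed: Replaces A's round-robin loop of |remainder| single-unit increments/decrements by a closed-form split: quotient and remainder of |remainder| by days, capped at the per-day capacity, computed once per day slot.
import Mathlib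
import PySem

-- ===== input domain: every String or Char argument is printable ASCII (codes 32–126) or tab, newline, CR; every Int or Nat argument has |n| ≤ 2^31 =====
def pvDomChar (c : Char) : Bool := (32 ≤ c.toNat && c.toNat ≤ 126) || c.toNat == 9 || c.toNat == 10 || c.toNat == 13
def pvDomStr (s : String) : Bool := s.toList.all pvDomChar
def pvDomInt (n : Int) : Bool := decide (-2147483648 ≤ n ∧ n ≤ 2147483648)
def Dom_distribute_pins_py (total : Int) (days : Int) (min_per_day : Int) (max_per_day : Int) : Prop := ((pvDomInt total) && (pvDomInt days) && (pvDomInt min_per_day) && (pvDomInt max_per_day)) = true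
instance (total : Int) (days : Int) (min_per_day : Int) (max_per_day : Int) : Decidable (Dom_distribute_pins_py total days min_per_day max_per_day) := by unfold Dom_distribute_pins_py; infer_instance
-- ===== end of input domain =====

-- B replaces A's round-robin loop of |remainder| single-unit steps by a closed-form
-- quotient/remainder split capped at the per-day capacity (O(days) instead of O(days + |remainder|)).

-- ===== PORT A =====
-- one iteration of A's `for i in range(abs(remainder))` body; the read/write are the total
-- forms (pyGet?/getD, pySetD) — Pre_ excludes exactly the inputs where Python would raise
def pvStepA (days min_per_day max_per_day rem : Int) (res : List Int) (i : Nat) : List Int :=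
  let idx := PySem.Int.mod (Int.ofNat i) days
  let cur := (PySem.List.pyGet? res idx).getD 0
  if rem > 0 ∧ cur < max_per_day then PySem.List.pySetD res idx (cur + 1)
  else if rem < 0 ∧ cur > min_per_day then PySem.List.pySetD res idx (cur - 1)
  else res

def pvLoopA (days min_per_day max_per_day rem : Int) : Nat → Nat → List Int → List Int
  | _, 0, res => res
  | i, k+1, res => pvLoopA days min_per_day max_per_day rem (i+1) k (pvStepA days min_per_day max_per_day rem res i)

def distribute_pins_py (total : Int) (days : Int) (min_per_day : Int) (max_per_day : Int) : List Int :=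
  let base := max min_per_day (min max_per_day (PySem.Int.floordiv total days))
  let result := List.replicate days.toNat base
  let remainder := total - result.sum
  pvLoopA days min_per_day max_per_day remainder 0 remainder.natAbs result

-- ===== PORT B =====
def distribute_pins_py_alt (total : Int) (days : Int) (min_per_day : Int) (max_per_day : Int) : List Int :=
  let base := max min_per_day (min max_per_day (PySem.Int.floordiv total days))
  let delta := total - base * days
  if 0 ≤ delta then
    let cap := max 0 (max_per_day - base)
    let q := PySem.Int.floordiv delta days
    let s := PySem.Int.mod delta days
    (List.range days.toNat).map (fun (j : Nat) => base + min cap (q + (if (j : Int) < s then 1 else 0)))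
  else
    let cap := max 0 (base - min_per_day)
    let q := PySem.Int.floordiv (-delta) days
    let s := PySem.Int.mod (-delta) days
    (List.range days.toNat).map (fun (j : Nat) => base - min cap (q + (if (j : Int) < s then 1 else 0)))

-- ===== PRECONDITION & SPEC =====
-- Pre_ excludes exactly the inputs on which A raises: days = 0 (ZeroDivisionError in total // days)
-- and days < 0 with total ≠ 0 (IndexError: the result list is empty but the loop indexes into it).
def Pre_distribute_pins_py (total : Int) (days : Int) (min_per_day : Int) (max_per_day : Int) : Prop :=
  days ≠ 0 ∧ (0 < days ∨ total = 0)
instance (total : Int) (days : Int) (min_per_day : Int) (max_per_day : Int) : Decidable (Pre_distribute_pins_py total days min_per_day max_per_day) := by unfold Pre_distribute_pins_py; infer_instance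

def pvWitness_distribute_pins_py : Int × Int × Int × Int := (10, 3, 0, 5)

def Spec_distribute_pins_py (total : Int) (days : Int) (min_per_day : Int) (max_per_day : Int) (out : List Int) : Prop := out = distribute_pins_py_alt total days min_per_day max_per_day
instance (total : Int) (days : Int) (min_per_day : Int) (max_per_day : Int) (out : List Int) : Decidable (Spec_distribute_pins_py total days min_per_day max_per_day out) := by unfold Spec_distribute_pins_py; infer_instance

-- ===== CLAIM (what is proved, stated in full; the proofs are below) =====
def Claim_equal_distribute_pins_py : Prop := ∀ (total : Int) (days : Int) (min_per_day : Int) (max_per_day : Int), Dom_distribute_pins_py total days min_per_day max_per_day → Pre_distribute_pins_py total days min_per_day max_per_day → Spec_distribute_pins_py total days min_per_day max_per_day (distribute_pins_py total days min_per_day max_per_day)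

-- ===== LEMMAS AND PROOFS =====

-- number of visits index j has received after m round-robin steps over n slots
def pvV (n m j : Nat) : Nat := m / n + (if j < m % n then 1 else 0)

lemma pvV_succ (n m j : Nat) (hn : 0 < n) (hj : j < n) :
    pvV n (m+1) j = pvV n m j + (if j = m % n then 1 else 0) := by
  have h1 := Nat.div_add_mod m n
  have hlt : m % n < n := Nat.mod_lt _ hn
  by_cases hc : m % n + 1 < n
  · have h2 : (m+1) / n = m / n ∧ (m+1) % n = m % n + 1 := by
      rw [Nat.div_mod_unique hn]
      omega
    simp only [pvV, h2.1, h2.2]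
    split_ifs <;> omega
  · have h2 : (m+1) / n = m / n + 1 ∧ (m+1) % n = 0 := by
      rw [Nat.div_mod_unique hn, Nat.mul_succ]
      omega
    simp only [pvV, h2.1, h2.2]
    split_ifs <;> omega

lemma pv_set_map_range (f : Nat → Int) (n j : Nat) (v : Int) :
    ((List.range n).map f).set j v = (List.range n).map (fun x => if x = j then v else f x) := by
  apply List.ext_getElem
  · simp
  · intro i h1 h2
    simp only [List.getElem_set, List.getElem_map, List.getElem_range]
    by_cases h : i = j
    · subst h; simp
    · rw [if_neg h, if_neg (by omega : ¬ j = i)]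

-- the state of A's loop after m steps (positive-remainder case, resp. negative)
def pvFUp (b cap : Int) (n m : Nat) : List Int :=
  (List.range n).map (fun j => b + min cap (pvV n m j : Int))

def pvFDown (b cap : Int) (n m : Nat) : List Int :=
  (List.range n).map (fun j => b - min cap (pvV n m j : Int))

lemma pv_step_up (days min_per_day max_per_day rem b : Int) (n i : Nat)
    (hn : 0 < n) (hd : days = (n : Int)) (hrem : 0 < rem) :
    pvStepA days min_per_day max_per_day rem (pvFUp b (max 0 (max_per_day - b)) n i) i
      = pvFUp b (max 0 (max_per_day - b)) n (i+1) := by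
  set cap := max 0 (max_per_day - b) with hcapdef
  have hcap : 0 ≤ cap := le_max_left _ _
  have hj : i % n < n := Nat.mod_lt _ hn
  have hidx : PySem.Int.mod (Int.ofNat i) days = ((i % n : Nat) : Int) := by
    rw [hd]; exact_mod_cast PySem.Int.mod_natCast i n
  have hget : (PySem.List.pyGet? (pvFUp b cap n i) (((i % n : Nat) : Int))).getD 0
      = b + min cap (pvV n i (i % n) : Int) := by
    rw [PySem.List.pyGet?_natCast]
    simp [pvFUp, hj]
  unfold pvStepA
  simp only [hidx, hget]
  set v : Int := (pvV n i (i % n) : Int) with hv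
  have hv0 : 0 ≤ v := by positivity
  by_cases hlt : b + min cap v < max_per_day
  · rw [if_pos ⟨hrem, hlt⟩]
    rw [PySem.List.pySetD_natCast]
    unfold pvFUp
    rw [pv_set_map_range]
    apply List.map_congr_left
    intro x hx
    have hxn : x < n := List.mem_range.mp hx
    rw [pvV_succ n i x hn hxn]
    by_cases hxe : x = i % n
    · subst hxe; rw [if_pos rfl, if_pos rfl]; push_cast; omega
    · rw [if_neg hxe, if_neg hxe]; push_cast; omega
  · rw [if_neg (by tauto), if_neg (by rintro ⟨h1, _⟩; omega)]
    unfold pvFUp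
    apply List.map_congr_left
    intro x hx
    have hxn : x < n := List.mem_range.mp hx
    rw [pvV_succ n i x hn hxn]
    by_cases hxe : x = i % n
    · subst hxe; rw [if_pos rfl]; push_cast; omega
    · rw [if_neg hxe]; push_cast; omega

lemma pv_step_down (days min_per_day max_per_day rem b : Int) (n i : Nat)
    (hn : 0 < n) (hd : days = (n : Int)) (hrem : rem < 0) :
    pvStepA days min_per_day max_per_day rem (pvFDown b (max 0 (b - min_per_day)) n i) i
      = pvFDown b (max 0 (b - min_per_day)) n (i+1) := by
  set cap := max 0 (b - min_per_day) with hcapdef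
  have hcap : 0 ≤ cap := le_max_left _ _
  have hj : i % n < n := Nat.mod_lt _ hn
  have hidx : PySem.Int.mod (Int.ofNat i) days = ((i % n : Nat) : Int) := by
    rw [hd]; exact_mod_cast PySem.Int.mod_natCast i n
  have hget : (PySem.List.pyGet? (pvFDown b cap n i) (((i % n : Nat) : Int))).getD 0
      = b - min cap (pvV n i (i % n) : Int) := by
    rw [PySem.List.pyGet?_natCast]
    simp [pvFDown, hj]
  unfold pvStepA
  simp only [hidx, hget]
  set v : Int := (pvV n i (i % n) : Int) with hv
  have hv0 : 0 ≤ v := by positivity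
  rw [if_neg (by rintro ⟨h1, _⟩; omega)]
  by_cases hlt : b - min cap v > min_per_day
  · rw [if_pos ⟨hrem, hlt⟩]
    rw [PySem.List.pySetD_natCast]
    unfold pvFDown
    rw [pv_set_map_range]
    apply List.map_congr_left
    intro x hx
    have hxn : x < n := List.mem_range.mp hx
    rw [pvV_succ n i x hn hxn]
    by_cases hxe : x = i % n
    · subst hxe; rw [if_pos rfl, if_pos rfl]; push_cast; omega
    · rw [if_neg hxe, if_neg hxe]; push_cast; omega
  · rw [if_neg (by tauto)]
    unfold pvFDown
    apply List.map_congr_left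
    intro x hx
    have hxn : x < n := List.mem_range.mp hx
    rw [pvV_succ n i x hn hxn]
    by_cases hxe : x = i % n
    · subst hxe; rw [if_pos rfl]; push_cast; omega
    · rw [if_neg hxe]; push_cast; omega

lemma pv_loop_up (days min_per_day max_per_day rem b : Int) (n : Nat)
    (hn : 0 < n) (hd : days = (n : Int)) (hrem : 0 < rem) :
    ∀ (k i : Nat), pvLoopA days min_per_day max_per_day rem i k (pvFUp b (max 0 (max_per_day - b)) n i)
      = pvFUp b (max 0 (max_per_day - b)) n (i+k) := by
  intro k
  induction k with
  | zero => intro i; rfl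
  | succ k ih =>
      intro i
      show pvLoopA days min_per_day max_per_day rem (i+1) k
        (pvStepA days min_per_day max_per_day rem (pvFUp b (max 0 (max_per_day - b)) n i) i) = _
      rw [pv_step_up days min_per_day max_per_day rem b n i hn hd hrem, ih (i+1)]
      congr 1
      omega

lemma pv_loop_down (days min_per_day max_per_day rem b : Int) (n : Nat)
    (hn : 0 < n) (hd : days = (n : Int)) (hrem : rem < 0) :
    ∀ (k i : Nat), pvLoopA days min_per_day max_per_day rem i k (pvFDown b (max 0 (b - min_per_day)) n i)
      = pvFDown b (max 0 (b - min_per_day)) n (i+k) := by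
  intro k
  induction k with
  | zero => intro i; rfl
  | succ k ih =>
      intro i
      show pvLoopA days min_per_day max_per_day rem (i+1) k
        (pvStepA days min_per_day max_per_day rem (pvFDown b (max 0 (b - min_per_day)) n i) i) = _
      rw [pv_step_down days min_per_day max_per_day rem b n i hn hd hrem, ih (i+1)]
      congr 1
      omega

lemma pv_replicate_up (b cap : Int) (n : Nat) (hc : 0 ≤ cap) :
    pvFUp b cap n 0 = List.replicate n b := by
  simp [pvFUp, pvV, min_eq_right hc, List.map_const']

lemma pv_replicate_down (b cap : Int) (n : Nat) (hc : 0 ≤ cap) :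
    pvFDown b cap n 0 = List.replicate n b := by
  simp [pvFDown, pvV, min_eq_right hc, List.map_const']

lemma pv_closed_up (b cap : Int) (n K : Nat) :
    (List.range n).map (fun (j : Nat) => b + min cap ((PySem.Int.floordiv (K:Int) (n:Int)) + (if (j : Int) < PySem.Int.mod (K:Int) (n:Int) then 1 else 0)))
      = pvFUp b cap n K := by
  apply List.map_congr_left
  intro x _
  rw [PySem.Int.floordiv_natCast, PySem.Int.mod_natCast]
  unfold pvV
  congr 1
  split_ifs with h1 h2 h2 <;> push_cast <;> omega

lemma pv_closed_down (b cap : Int) (n K : Nat) :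
    (List.range n).map (fun (j : Nat) => b - min cap ((PySem.Int.floordiv (K:Int) (n:Int)) + (if (j : Int) < PySem.Int.mod (K:Int) (n:Int) then 1 else 0)))
      = pvFDown b cap n K := by
  apply List.map_congr_left
  intro x _
  rw [PySem.Int.floordiv_natCast, PySem.Int.mod_natCast]
  unfold pvV
  congr 1
  split_ifs with h1 h2 h2 <;> push_cast <;> omega

-- ===== VERDICT (by name: the statement is the Claim_ definition above) =====
theorem distribute_pins_py_spec : Claim_equal_distribute_pins_py := by
  intro total days mn mx _hDom hPre
  obtain ⟨hd0, hcase⟩ := hPre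
  unfold Spec_distribute_pins_py
  by_cases hdpos : 0 < days
  · have hn : 0 < days.toNat := by omega
    have hdn : days = ((days.toNat : Nat) : Int) := by omega
    simp only [distribute_pins_py, distribute_pins_py_alt]
    set n := days.toNat with hndef
    set b := max mn (min mx (PySem.Int.floordiv total days)) with hbdef
    have hsum : (List.replicate n b).sum = (n : Int) * b := by
      simp [List.sum_replicate, nsmul_eq_mul]
    rw [hsum]
    have hdelta : total - b * days = total - (n : Int) * b := by rw [hdn]; ring
    rw [hdelta]
    set r := total - (n : Int) * b with hrdef
    by_cases hr : 0 ≤ r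
    · rw [if_pos hr]
      have hK : r = ((r.natAbs : Nat) : Int) := by omega
      set K := r.natAbs with hKdef
      have hB : (List.range n).map
            (fun (j : Nat) => b + min (max 0 (mx - b)) ((PySem.Int.floordiv r (days : Int)) + (if (j : Int) < PySem.Int.mod r (days : Int) then 1 else 0)))
          = pvFUp b (max 0 (mx - b)) n K := by
        rw [hK, hdn]
        exact pv_closed_up b (max 0 (mx - b)) n K
      rw [hB]
      rcases Nat.eq_zero_or_pos K with h0 | hKpos
      · rw [h0]
        show List.replicate n b = pvFUp b (max 0 (mx - b)) n 0
        rw [pv_replicate_up b _ n (le_max_left _ _)]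
      · have hrpos : 0 < r := by omega
        rw [← pv_replicate_up b (max 0 (mx - b)) n (le_max_left _ _)]
        rw [pv_loop_up days mn mx r b n hn hdn hrpos K 0]
        norm_num
    · rw [if_neg hr]
      have hK : -r = ((r.natAbs : Nat) : Int) := by omega
      set K := r.natAbs with hKdef
      have hB : (List.range n).map
            (fun (j : Nat) => b - min (max 0 (b - mn)) ((PySem.Int.floordiv (-r) (days : Int)) + (if (j : Int) < PySem.Int.mod (-r) (days : Int) then 1 else 0)))
          = pvFDown b (max 0 (b - mn)) n K := by
        rw [hK, hdn]
        exact pv_closed_down b (max 0 (b - mn)) n K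
      rw [hB]
      have hrneg : r < 0 := by omega
      rw [← pv_replicate_down b (max 0 (b - mn)) n (le_max_left _ _)]
      rw [pv_loop_down days mn mx r b n hn hdn hrneg K 0]
      norm_num
  · have ht : total = 0 := hcase.resolve_left hdpos
    have hnn : days.toNat = 0 := by omega
    subst ht
    simp only [distribute_pins_py, distribute_pins_py_alt, hnn]
    simp [pvLoopA]
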